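-- pv_equiv track=rewrite | github.com/DanielDavalos93/algorithm-graphs | wdg.py | tuple_less
-- ===== SOURCE A (Python) =====
-- def tuple_less(tuples):
--     new_tuples = []
--     for tp in tuples:
--         for i in range(len(tp)):
--             for j in range(i,len(tp)):
--                 if tp[i] < tp[j]:
--                     new_tuples.append(tp)
--                 else:
--                     continue
--     return new_tuples
-- ===== SOURCE B (Python) =====
-- def tuple_less(tuples):
--     new_tuples = []
--     for tp in tuples:
--         count = 0
--         prefix = []  # sorted list of the elements seen so far
--         for x in tp:
--             k = 0
--             while k < len(prefix) and prefix[k] < x: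
--                 k += 1
--             count += k
--             prefix.insert(k, x)
--         new_tuples.extend([tp] * count)
--     return new_tuples
-- ===== Notes on version B (the rewrite author's own statement) =====
-- stated objective: alternative
-- what changed: Instead of scanning all index pairs (i,j) per tuple and appending the tuple on each increasing pair, B maintains a sorted prefix per tuple, sums each element's insertion position (= number of strictly smaller earlier elements) to get the increasing-pair count in one pass, then extends the output with count copies of the tuple.
import Mathlib
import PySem

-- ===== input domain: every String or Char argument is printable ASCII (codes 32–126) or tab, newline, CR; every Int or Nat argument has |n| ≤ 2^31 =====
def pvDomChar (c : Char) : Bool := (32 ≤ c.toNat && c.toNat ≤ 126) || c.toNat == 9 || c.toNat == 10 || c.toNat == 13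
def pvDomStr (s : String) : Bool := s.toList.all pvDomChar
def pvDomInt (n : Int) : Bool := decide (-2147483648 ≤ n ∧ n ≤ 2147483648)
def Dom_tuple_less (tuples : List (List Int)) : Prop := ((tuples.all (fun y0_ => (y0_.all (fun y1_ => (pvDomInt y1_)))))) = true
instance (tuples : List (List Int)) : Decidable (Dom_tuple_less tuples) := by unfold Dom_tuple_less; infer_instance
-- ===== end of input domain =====

-- B maintains a sorted prefix and adds, per element, its insertion position (= number of
-- strictly smaller earlier elements), then extends the output with count copies of the tuple.

-- ===== PORT A =====
def tuple_less (tuples : List (List Int)) : List (List Int) :=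
  tuples.foldl (fun nt tp =>
    (PySem.List.pyRange 0 (tp.length : Int) 1).foldl (fun nt i =>
      (PySem.List.pyRange i (tp.length : Int) 1).foldl (fun nt j =>
        if PySem.List.pyGetD tp i 0 < PySem.List.pyGetD tp j 0 then nt ++ [tp] else nt) nt) nt) []

-- ===== PORT B =====
-- the 'while k < len(prefix) and prefix[k] < x' scan, as structural recursion on the prefix
def countLess : List Int → Int → Nat
  | [], _ => 0
  | h :: t, x => if h < x then countLess t x + 1 else 0

def tuple_less_alt (tuples : List (List Int)) : List (List Int) :=
  tuples.foldl (fun nt tp =>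
    let cp := tp.foldl (fun (p : Nat × List Int) x =>
      let k := countLess p.2 x
      (p.1 + k, PySem.List.insert p.2 (k : Int) x)) (0, [])
    nt ++ List.replicate cp.1 tp) []

-- ===== PRECONDITION & SPEC =====
def Spec_tuple_less (tuples : List (List Int)) (out : List (List Int)) : Prop := out = tuple_less_alt tuples
instance (tuples : List (List Int)) (out : List (List Int)) : Decidable (Spec_tuple_less tuples out) := by unfold Spec_tuple_less; infer_instance

-- ===== CLAIM (what is proved, stated in full; the proofs are below) =====
def Claim_equal_tuple_less : Prop := ∀ (tuples : List (List Int)), Dom_tuple_less tuples → Spec_tuple_less tuples (tuple_less tuples)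

-- ===== LEMMAS AND PROOFS =====

-- number of increasing ordered pairs (i < j, a_i < a_j), head-vs-tail recursion
def pairCount : List Int → Nat
  | [] => 0
  | x :: t => t.countP (fun y => decide (x < y)) + pairCount t

theorem countLess_eq_takeWhile (sp : List Int) (x : Int) :
    countLess sp x = (sp.takeWhile (fun y => decide (y < x))).length := by
  induction sp with
  | nil => rfl
  | cons h t ih =>
    by_cases hx : h < x <;> simp [countLess, List.takeWhile, hx, ih]

theorem countLess_le (sp : List Int) (x : Int) : countLess sp x ≤ sp.length := by
  rw [countLess_eq_takeWhile]
  exact (List.takeWhile_prefix _).length_le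

theorem mem_dropWhile_not_lt (sp : List Int) (x : Int)
    (hs : sp.Pairwise (· ≤ ·)) :
    ∀ y ∈ sp.dropWhile (fun y => decide (y < x)), ¬ (y < x) := by
  induction sp with
  | nil => simp [List.dropWhile]
  | cons h t ih =>
    intro y hy
    by_cases hx : h < x
    · simp only [List.dropWhile, hx, decide_true] at hy
      exact ih (List.Pairwise.of_cons hs) y hy
    · simp only [List.dropWhile, hx, decide_false] at hy
      rcases List.mem_cons.mp hy with rfl | hy
      · exact hx
      · have := (List.pairwise_cons.mp hs).1 y hy
        omega

theorem countLess_eq_countP (sp : List Int) (x : Int)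
    (hs : sp.Pairwise (· ≤ ·)) :
    countLess sp x = sp.countP (fun y => decide (y < x)) := by
  rw [countLess_eq_takeWhile]
  conv_rhs => rw [← List.takeWhile_append_dropWhile (p := fun y => decide (y < x)) (l := sp)]
  rw [List.countP_append]
  have h1 : (sp.takeWhile (fun y => decide (y < x))).countP (fun y => decide (y < x)) =
      (sp.takeWhile (fun y => decide (y < x))).length := by
    apply List.countP_eq_length.mpr
    intro y hy
    simpa using List.mem_takeWhile_imp hy
  have h2 : (sp.dropWhile (fun y => decide (y < x))).countP (fun y => decide (y < x)) = 0 := by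
    apply List.countP_eq_zero.mpr
    intro y hy
    simpa using mem_dropWhile_not_lt sp x hs y hy
  omega

theorem insert_countLess (sp : List Int) (x : Int) :
    PySem.List.insert sp ((countLess sp x : Nat) : Int) x =
      sp.takeWhile (fun y => decide (y < x)) ++ x :: sp.dropWhile (fun y => decide (y < x)) := by
  rw [PySem.List.insert_natCast sp (countLess sp x) x (countLess_le sp x),
      countLess_eq_takeWhile]
  have hpre : sp.take (sp.takeWhile (fun y => decide (y < x))).length
      = sp.takeWhile (fun y => decide (y < x)) :=
    (List.prefix_iff_eq_take.mp (List.takeWhile_prefix _)).symm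
  have hdrop : sp.drop (sp.takeWhile (fun y => decide (y < x))).length
      = sp.dropWhile (fun y => decide (y < x)) := by
    have := List.takeWhile_append_dropWhile (p := fun y => decide (y < x)) (l := sp)
    have h2 : sp.take (sp.takeWhile (fun y => decide (y < x))).length
        ++ sp.drop (sp.takeWhile (fun y => decide (y < x))).length = sp := List.take_append_drop _ _
    rw [hpre] at h2
    conv_rhs at this => rw [← h2]
    exact (List.append_cancel_left this).symm
  rw [hpre, hdrop]

theorem insert_pairwise (sp : List Int) (x : Int) (hs : sp.Pairwise (· ≤ ·)) :
    (sp.takeWhile (fun y => decide (y < x)) ++ x :: sp.dropWhile (fun y => decide (y < x))).Pairwise (· ≤ ·) := by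
  have hsplit := List.takeWhile_append_dropWhile (p := fun y => decide (y < x)) (l := sp)
  have hs' : (sp.takeWhile (fun y => decide (y < x)) ++ sp.dropWhile (fun y => decide (y < x))).Pairwise (· ≤ ·) := by
    rwa [hsplit]
  rw [List.pairwise_append] at hs' ⊢
  obtain ⟨htw, hdw, hcross⟩ := hs'
  refine ⟨htw, ?_, ?_⟩
  · rw [List.pairwise_cons]
    refine ⟨fun y hy => ?_, hdw⟩
    have := mem_dropWhile_not_lt sp x hs y hy
    omega
  · intro a ha b hb
    have halt : a < x := by simpa using List.mem_takeWhile_imp ha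
    rcases List.mem_cons.mp hb with rfl | hb
    · omega
    · exact hcross a ha b hb

theorem insert_perm (sp : List Int) (x : Int) :
    (sp.takeWhile (fun y => decide (y < x)) ++ x :: sp.dropWhile (fun y => decide (y < x))).Perm (x :: sp) := by
  have h := List.perm_middle (a := x) (l₁ := sp.takeWhile (fun y => decide (y < x)))
    (l₂ := sp.dropWhile (fun y => decide (y < x)))
  rwa [List.takeWhile_append_dropWhile] at h

-- incremental pair count against an accumulated prefix (multiset view of B's state)
def pc (pre : List Int) : List Int → Nat
  | [] => 0
  | x :: l => pre.countP (fun y => decide (y < x)) + pc (pre ++ [x]) l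

theorem foldB_eq_pc (l : List Int) :
    ∀ (c : Nat) (sp pre : List Int), sp.Pairwise (· ≤ ·) → sp.Perm pre →
    (l.foldl (fun (p : Nat × List Int) x =>
      let k := countLess p.2 x
      (p.1 + k, PySem.List.insert p.2 (k : Int) x)) (c, sp)).1 = c + pc pre l := by
  induction l with
  | nil => intro c sp pre _ _; simp [pc]
  | cons x l ih =>
    intro c sp pre hs hp
    simp only [List.foldl_cons, pc]
    rw [insert_countLess]
    rw [ih (c + countLess sp x) _ (pre ++ [x]) (insert_pairwise sp x hs)
      ((insert_perm sp x).trans ((hp.cons x).trans (List.perm_append_singleton x pre).symm))]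
    rw [countLess_eq_countP sp x hs, hp.countP_eq]
    omega

theorem pc_eq (l : List Int) : ∀ pre : List Int,
    pc pre l = (l.map (fun x => pre.countP (fun y => decide (y < x)))).sum + pairCount l := by
  induction l with
  | nil => intro pre; simp [pc, pairCount]
  | cons x l ih =>
    intro pre
    simp only [pc, pairCount, ih (pre ++ [x]), List.map_cons, List.sum_cons]
    have : ∀ z, (pre ++ [x]).countP (fun y => decide (y < z)) =
        pre.countP (fun y => decide (y < z)) + if x < z then 1 else 0 := by
      intro z; rw [List.countP_append]; simp [List.countP_cons]
    simp only [this]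
    have hsplit : ∀ m : List Int, (m.map (fun z => pre.countP (fun y => decide (y < z)) + if x < z then 1 else 0)).sum
        = (m.map (fun z => pre.countP (fun y => decide (y < z)))).sum
          + (m.map (fun z => if x < z then 1 else 0)).sum := by
      intro m
      induction m with
      | nil => simp
      | cons a t iht => simp only [List.map_cons, List.sum_cons, iht]; omega
    have hcnt : ∀ m : List Int, (m.map (fun z => if x < z then 1 else 0)).sum = m.countP (fun y => decide (x < y)) := by
      intro m
      induction m with
      | nil => simp
      | cons a t iht =>
        simp only [List.map_cons, List.sum_cons, List.countP_cons, iht]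
        by_cases h : x < a <;> simp [h] <;> omega
    rw [hsplit, hcnt]
    omega

-- A's inner double loop counts via drop/suffix; reduce it to pairCount
theorem sumA_eq_pairCount (tp : List Int) :
    ((List.range tp.length).map (fun k => (tp.drop k).countP (fun y => decide (tp.getD k 0 < y)))).sum
      = pairCount tp := by
  induction tp with
  | nil => simp [pairCount]
  | cons x t ih =>
    rw [List.length_cons, List.range_succ_eq_map, List.map_cons, List.map_map, List.sum_cons]
    have h0 : ((x :: t).drop 0).countP (fun y => decide ((x :: t).getD 0 0 < y))
        = t.countP (fun y => decide (x < y)) := by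
      simp
    have h1 : ((List.range t.length).map
        ((fun k => ((x :: t).drop k).countP (fun y => decide ((x :: t).getD k 0 < y))) ∘ (· + 1))).sum
        = ((List.range t.length).map (fun k => (t.drop k).countP (fun y => decide (t.getD k 0 < y)))).sum := by
      apply congrArg List.sum
      apply List.map_congr_left
      intro k _
      simp [Function.comp]
    rw [h0, h1, ih]
    simp [pairCount]

theorem flatMap_replicate {α : Type} (c : α) (n : Int → Nat) (l : List Int) :
    l.flatMap (fun i => List.replicate (n i) c) = List.replicate ((l.map n).sum) c := by
  induction l with
  | nil => simp
  | cons a t ih => rw [List.flatMap_cons, ih, List.map_cons, List.sum_cons, List.replicate_add]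

-- A's per-tuple body produces (pairCount tp) copies of tp
theorem bodyA_eq (tp : List Int) (nt : List (List Int)) :
    (PySem.List.pyRange 0 (tp.length : Int) 1).foldl (fun nt i =>
      (PySem.List.pyRange i (tp.length : Int) 1).foldl (fun nt j =>
        if PySem.List.pyGetD tp i 0 < PySem.List.pyGetD tp j 0 then nt ++ [tp] else nt) nt) nt
    = nt ++ List.replicate (pairCount tp) tp := by
  have hinner : ∀ (i : Int) (acc : List (List Int)), 0 ≤ i →
      (PySem.List.pyRange i (tp.length : Int) 1).foldl (fun nt j =>
        if PySem.List.pyGetD tp i 0 < PySem.List.pyGetD tp j 0 then nt ++ [tp] else nt) acc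
      = acc ++ List.replicate ((tp.drop i.toNat).countP (fun y => decide (PySem.List.pyGetD tp i 0 < y))) tp := by
    intro i acc hi
    rw [PySem.List.foldl_pyRange_pyGetD' (xs := tp) (a := i) (d := 0)
      (f := fun nt y => if PySem.List.pyGetD tp i 0 < y then nt ++ [tp] else nt) (init := acc) hi]
    rw [PySem.List.foldl_append_ite (p := fun y => PySem.List.pyGetD tp i 0 < y) (f := fun _ => tp)]
    congr 1
    simp [List.map_const', List.countP_eq_length_filter]
  calc (PySem.List.pyRange 0 (tp.length : Int) 1).foldl (fun nt i =>
      (PySem.List.pyRange i (tp.length : Int) 1).foldl (fun nt j =>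
        if PySem.List.pyGetD tp i 0 < PySem.List.pyGetD tp j 0 then nt ++ [tp] else nt) nt) nt
      = (PySem.List.pyRange 0 (tp.length : Int) 1).foldl (fun nt i =>
          nt ++ List.replicate ((tp.drop i.toNat).countP (fun y => decide (PySem.List.pyGetD tp i 0 < y))) tp) nt := by
        apply PySem.List.foldl_congr_mem
        intro acc i hi
        exact hinner i acc (PySem.List.mem_pyRange_one.mp hi).1
  _ = nt ++ List.replicate (pairCount tp) tp := by
        rw [PySem.List.foldl_append_eq_flatMap
          (g := fun i => List.replicate ((tp.drop i.toNat).countP (fun y => decide (PySem.List.pyGetD tp i 0 < y))) tp)]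
        rw [flatMap_replicate]
        congr 1
        rw [← sumA_eq_pairCount tp]
        rw [PySem.List.pyRange_one, List.map_map]
        congr 1
        apply congrArg List.sum
        have hl : (((tp.length : Int) - 0)).toNat = tp.length := by simp
        rw [hl]
        congr 1
        funext k
        simp [Function.comp, PySem.List.pyGetD_natCast]

theorem bodyB_eq (tp : List Int) (nt : List (List Int)) :
    (nt ++ List.replicate
      ((tp.foldl (fun (p : Nat × List Int) x =>
        let k := countLess p.2 x
        (p.1 + k, PySem.List.insert p.2 (k : Int) x)) (0, [])).1) tp)
    = nt ++ List.replicate (pairCount tp) tp := by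
  congr 1
  rw [foldB_eq_pc tp 0 [] [] (by simp) (List.Perm.refl _)]
  rw [pc_eq]
  simp

theorem tuple_less_eq (tuples : List (List Int)) : tuple_less tuples = tuple_less_alt tuples := by
  unfold tuple_less tuple_less_alt
  induction tuples using List.reverseRecOn with
  | nil => rfl
  | append_singleton ts tp ih =>
    rw [List.foldl_append, List.foldl_append, ih]
    simp only [List.foldl_cons, List.foldl_nil]
    rw [bodyA_eq, bodyB_eq]

-- ===== VERDICT (by name: the statement is the Claim_ definition above) =====
theorem tuple_less_spec : Claim_equal_tuple_less := by
  intro tuples _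
  unfold Spec_tuple_less
  exact tuple_less_eq tuples
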